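-- pv_equiv track=rewrite | github.com/iamdv43/PracticeDSA | goodString.py | goodString
-- ===== SOURCE A (Python) =====
-- def goodString(N,Q,S,arr,ranges):
--     count = 0
--     for i in ranges:
--         sub = S[i[0]-1:i[1]]
--         for c in sub:
--             if sub.count(c) > 1:
--                 sub = sub.replace(c, '')
--                 count += 1
--         S.replace(S[i[0]-1:i[1]], sub)
--     return count
-- ===== SOURCE B (Python) =====
-- def goodString(N, Q, S, arr, ranges):
--     # One pass per query: build a frequency dict of the slice, then count
--     # distinct characters occurring at least twice (no repeated count/replace scans).
--     total = 0
--     for i in ranges: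
--         sub = S[i[0]-1:i[1]]
--         freq = {}
--         for c in sub:
--             freq[c] = freq.get(c, 0) + 1
--         for v in freq.values():
--             if v > 1:
--                 total += 1
--     return total
-- ===== Notes on version B (the rewrite author's own statement) =====
-- stated objective: faster
-- what changed: Per query, instead of A's destructive loop that repeatedly rescans the slice with str.count and str.replace (quadratic per slice), B builds a character-frequency dict of the slice in one pass and counts values >= 2.
import Mathlib
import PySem

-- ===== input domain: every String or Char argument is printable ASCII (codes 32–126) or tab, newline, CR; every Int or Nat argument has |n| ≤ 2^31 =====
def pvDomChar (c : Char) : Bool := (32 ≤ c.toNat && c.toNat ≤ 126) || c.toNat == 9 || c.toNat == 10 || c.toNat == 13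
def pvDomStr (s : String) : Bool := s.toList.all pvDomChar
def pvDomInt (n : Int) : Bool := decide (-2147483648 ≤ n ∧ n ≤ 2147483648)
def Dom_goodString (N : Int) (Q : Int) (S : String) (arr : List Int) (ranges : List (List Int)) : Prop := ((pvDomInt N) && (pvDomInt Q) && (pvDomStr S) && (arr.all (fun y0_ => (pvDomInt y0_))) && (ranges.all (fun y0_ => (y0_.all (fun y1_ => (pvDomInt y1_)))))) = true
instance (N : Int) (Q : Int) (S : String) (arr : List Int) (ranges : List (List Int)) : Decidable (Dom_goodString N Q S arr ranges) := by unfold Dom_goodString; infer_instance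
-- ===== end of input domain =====

-- B replaces A's per-query destructive count/replace rescans by a one-pass frequency
-- dict per query (objective: faster; return value only — A's trailing `S.replace(...)`
-- discards its result, Python strings are immutable, so it is a value-level no-op).

-- ===== PORT A =====
-- `for c in sub:` iterates over the string object `sub` was bound to when the loop
-- started; rebinding `sub` inside does not change the iteration — hence the fold is
-- over the original slice while the state carries the current `sub`.
def goodString (N : Int) (Q : Int) (S : String) (arr : List Int) (ranges : List (List Int)) : Int :=
  ranges.foldl (fun count i =>
    match PySem.List.pyGet? i 0, PySem.List.pyGet? i 1 with
    | some a, some b =>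
        let sub := PySem.List.slice S.toList (some (a - 1)) (some b)
        ((sub.foldl (fun (st : List Char × Int) c =>
            if 1 < PySem.Chars.count st.1 [c] then
              (PySem.Chars.replace st.1 [c] [], st.2 + 1)
            else st) (sub, count)).2)
        -- A then evaluates `S.replace(S[i[0]-1:i[1]], sub)` and discards the result:
        -- a value-level no-op, omitted.
    | _, _ => count) 0  -- unreachable under Pre_goodString (i[0]/i[1] would raise IndexError)

-- ===== PORT B =====
def goodString_alt (N : Int) (Q : Int) (S : String) (arr : List Int) (ranges : List (List Int)) : Int :=
  ranges.foldl (fun total i =>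
    match PySem.List.pyGet? i 0 with
    | none => total  -- unreachable under Pre_goodString (i[0] would raise IndexError)
    | some a =>
      match PySem.List.pyGet? i 1 with
      | none => total  -- unreachable under Pre_goodString (i[1] would raise IndexError)
      | some b =>
        let sub := PySem.List.slice S.toList (some (a - 1)) (some b)
        let freq := sub.foldl (fun (d : PySem.Dict Char Int) c => d.insert c (d.getD c 0 + 1)) PySem.Dict.empty
        freq.values.foldl (fun t v => if 1 < v then t + 1 else t) total) 0

-- ===== PRECONDITION & SPEC =====
-- Pre_ excludes exactly the inputs where A raises: a query list with fewer than two
-- entries makes `i[0]`/`i[1]` raise IndexError (B raises there too).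
def Pre_goodString (N : Int) (Q : Int) (S : String) (arr : List Int) (ranges : List (List Int)) : Prop :=
  ∀ i ∈ ranges, 2 ≤ i.length
instance (N : Int) (Q : Int) (S : String) (arr : List Int) (ranges : List (List Int)) : Decidable (Pre_goodString N Q S arr ranges) := by unfold Pre_goodString; infer_instance

def pvWitness_goodString : Int × Int × String × List Int × List (List Int) :=
  (5, 2, "aabbc", [1], [[1, 5], [2, 4]])

def Spec_goodString (N : Int) (Q : Int) (S : String) (arr : List Int) (ranges : List (List Int)) (out : Int) : Prop := out = goodString_alt N Q S arr ranges
instance (N : Int) (Q : Int) (S : String) (arr : List Int) (ranges : List (List Int)) (out : Int) : Decidable (Spec_goodString N Q S arr ranges out) := by unfold Spec_goodString; infer_instance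

-- ===== CLAIM (what is proved, stated in full; the proofs are below) =====
def Claim_equal_goodString : Prop := ∀ (N : Int) (Q : Int) (S : String) (arr : List Int) (ranges : List (List Int)), Dom_goodString N Q S arr ranges → Pre_goodString N Q S arr ranges → Spec_goodString N Q S arr ranges (goodString N Q S arr ranges)

-- ===== LEMMAS AND PROOFS =====

-- `s.count(c)` for a single character is plain character counting.
lemma count_go_singleton (c : Char) : ∀ (fuel : Nat) (l : List Char) (acc : Nat),
    PySem.Chars.count.go [c] fuel l acc = acc + (l.take fuel).count c := by
  intro fuel
  induction fuel with
  | zero => intro l acc; simp [PySem.Chars.count.go]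
  | succ n ih =>
    intro l acc
    cases l with
    | nil => simp [PySem.Chars.count.go]
    | cons h t =>
      rw [PySem.Chars.count.go]
      by_cases hc : c = h
      · subst hc
        simp [List.isPrefixOf, ih]
        omega
      · simp [List.isPrefixOf, hc, ih, Ne.symm hc]

lemma count_singleton (s : List Char) (c : Char) :
    PySem.Chars.count s [c] = s.count c := by
  simp [PySem.Chars.count, count_go_singleton]

-- `s.replace(c, '')` for a single character removes every occurrence of that character.
lemma replace_go_singleton (c : Char) : ∀ (fuel : Nat) (l acc : List Char),
    PySem.Chars.replace.go [c] [] fuel l acc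
      = acc.reverse ++ (l.take fuel).filter (fun x => x ≠ c) ++ l.drop fuel := by
  intro fuel
  induction fuel with
  | zero => intro l acc; simp [PySem.Chars.replace.go]
  | succ n ih =>
    intro l acc
    cases l with
    | nil => simp [PySem.Chars.replace.go]
    | cons h t =>
      rw [PySem.Chars.replace.go]
      by_cases hc : c = h
      · subst hc
        simp [List.isPrefixOf, ih]
      · simp [List.isPrefixOf, hc, ih, Ne.symm hc]

lemma replace_singleton (s : List Char) (c : Char) :
    PySem.Chars.replace s [c] [] = s.filter (fun x => x ≠ c) := by
  simp [PySem.Chars.replace, replace_go_singleton]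

-- The loop body of A, after `count`/`replace` on a single character are reduced
-- to plain character counting / filtering (proof-side helper).
def stepA (st : List Char × Int) (c : Char) : List Char × Int :=
  if 1 < st.1.count c then (st.1.filter (fun x => x ≠ c), st.2 + 1) else st

lemma stepA_eq (st : List Char × Int) (c : Char) :
    (if 1 < PySem.Chars.count st.1 [c] then
      (PySem.Chars.replace st.1 [c] [], st.2 + 1)
    else st) = stepA st c := by
  rw [stepA, count_singleton, replace_singleton]

-- A's inner loop counts the distinct characters of the slice occurring at least twice.
lemma a_inner (t : List Char) : ∀ (s : List Char) (k : Int),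
    (t.foldl stepA (s, k)).2
      = k + ((t.toFinset.filter (fun d => 1 < s.count d)).card : Int) := by
  induction t with
  | nil => intro s k; simp
  | cons c t ih =>
    intro s k
    rw [List.foldl_cons, stepA]
    simp only [List.toFinset_cons, Finset.filter_insert]
    by_cases h : 1 < s.count c
    · rw [if_pos h, if_pos h, ih]
      have hfil : t.toFinset.filter (fun d => 1 < (s.filter (fun x => x ≠ c)).count d)
          = (t.toFinset.filter (fun d => 1 < s.count d)).erase c := by
        ext d
        by_cases hd : d = c
        · subst hd
          simp [Finset.mem_erase]
          intro _
          have h0 : (s.filter (fun x => !decide (x = d))).count d = 0 :=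
            List.count_eq_zero.mpr (by simp)
          omega
        · have hcnt : (s.filter (fun x => !decide (x = c))).count d = s.count d :=
            List.count_filter (by simp [hd])
          simp [hcnt, hd]
      rw [hfil]
      set X := t.toFinset.filter (fun d => 1 < s.count d) with hX
      by_cases hm : c ∈ X
      · rw [Finset.insert_eq_self.mpr hm, Finset.card_erase_of_mem hm]
        have : 0 < X.card := Finset.card_pos.mpr ⟨c, hm⟩
        omega
      · rw [Finset.card_insert_of_notMem hm, Finset.erase_eq_of_notMem hm]
        push_cast
        omega
    · rw [if_neg h, if_neg h, ih]

-- B's frequency dict is Counter(sub); its >1 values are exactly those characters.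
lemma b_inner (t : List Char) (k : Int) :
    ((t.foldl (fun (d : PySem.Dict Char Int) c => d.insert c (d.getD c 0 + 1))
        PySem.Dict.empty).values.foldl (fun a v => if 1 < v then a + 1 else a) k)
      = k + ((t.toFinset.filter (fun d => 1 < t.count d)).card : Int) := by
  rw [PySem.Dict.foldl_insert_getD_add_one_eq_counter]
  rw [PySem.List.foldl_ite_add_one]
  have hvals : (PySem.Dict.counter t).values
      = (PySem.Set.ofList t).map (fun c => ((t.count c : Nat) : Int)) := by
    show (PySem.Dict.counter t).items.map (·.2) = _
    rw [PySem.Dict.items_counter]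
    simp
  rw [hvals, List.countP_map]
  have hnd : (PySem.Set.ofList t).Nodup := PySem.Set.nodup_ofList t
  have hcp : ((PySem.Set.ofList t).countP
        ((fun v => decide (1 < v)) ∘ fun c => ((t.count c : Nat) : Int)))
      = (t.toFinset.filter (fun d => 1 < t.count d)).card := by
    rw [List.countP_eq_length_filter]
    have hnodup := List.Nodup.filter
      ((fun v => decide (1 < v)) ∘ fun c => ((t.count c : Nat) : Int)) hnd
    rw [← List.toFinset_card_of_nodup hnodup, List.toFinset_filter]
    congr 1
    ext d
    simp [PySem.Set.mem_ofList]
  rw [hcp]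

-- Per query the two bodies agree (they also agree on the unreachable fallback branch).
lemma step_eq (S : String) : ∀ (acc : Int) (i : List Int),
    (fun count i =>
      match PySem.List.pyGet? i 0, PySem.List.pyGet? i 1 with
      | some a, some b =>
          let sub := PySem.List.slice S.toList (some (a - 1)) (some b)
          ((sub.foldl (fun (st : List Char × Int) c =>
              if 1 < PySem.Chars.count st.1 [c] then
                (PySem.Chars.replace st.1 [c] [], st.2 + 1)
              else st) (sub, count)).2)
      | _, _ => count) acc i
    = (fun total i =>
      match PySem.List.pyGet? i 0 with
      | none => total
      | some a =>
        match PySem.List.pyGet? i 1 with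
        | none => total
        | some b =>
          let sub := PySem.List.slice S.toList (some (a - 1)) (some b)
          let freq := sub.foldl (fun (d : PySem.Dict Char Int) c => d.insert c (d.getD c 0 + 1)) PySem.Dict.empty
          freq.values.foldl (fun t v => if 1 < v then t + 1 else t) total) acc i := by
  intro acc i
  cases h0 : PySem.List.pyGet? i 0 with
  | none => simp [h0]
  | some a =>
    cases h1 : PySem.List.pyGet? i 1 with
    | none => simp [h0, h1]
    | some b =>
      simp only [h0, h1]
      rw [PySem.List.foldl_congr_mem _ _ stepA _ (fun acc x _ => stepA_eq acc x)]
      rw [a_inner, b_inner]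

-- ===== VERDICT (by name: the statement is the Claim_ definition above) =====
theorem goodString_spec : Claim_equal_goodString := by
  intro N Q S arr ranges _ _
  unfold Spec_goodString goodString goodString_alt
  exact PySem.List.foldl_congr_mem _ _ _ _ (fun acc x _ => step_eq S acc x)
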